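-- pv_equiv track=rewrite | github.com/Lirkalyn2/GOMOKU_CAU | ai.py | verticalScore
-- ===== SOURCE A (Python) =====
-- def verticalScore(matrix):
--     score = 0
--
--     for i in range(len(matrix)):
--         current = 0
--         streak = 0
--         for j in range(len(matrix)):
--             (current, streak, score) = scoreConsecutive(matrix[j][i], current, streak, score)
--
--         if current != 0:
--             score += current * adjacentBlockScore(streak)
--
--     return -1 * score
--
-- def scoreConsecutive(block, current, streak, score):
--     if block != current:
--         if current == 0:
--             current = block
--             streak = 1
--         else:
--             score += current * adjacentBlockScore(streak)
--             current = block
--             streak = 1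
--     else:
--         if block != 0:
--             streak += 1
--
--     return (current, streak, score)
--
-- def adjacentBlockScore(count):
--     scoreMatrix = [0, 2, 4, 8, 16, 32]
--     try:
--         return scoreMatrix[count]
--     except:
--         return -1
-- ===== SOURCE B (Python) =====
-- def verticalScore(matrix):
--     n = len(matrix)
--     total = 0
--     for i in range(n):
--         column = [matrix[j][i] for j in range(n)]
--         for value, length in _runs(column):
--             if value != 0:
--                 total += value * _blockScore(length)
--     return -total
--
-- def _blockScore(count):
--     table = [0, 2, 4, 8, 16, 32]
--     return table[count] if count < len(table) else -1
--
-- def _runs(xs):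
--     if not xs:
--         return []
--     head = xs[0]
--     i = 1
--     while i < len(xs) and xs[i] == head:
--         i += 1
--     return [(head, i)] + _runs(xs[i:])
-- ===== Notes on version B (the rewrite author's own statement) =====
-- stated objective: simpler
-- what changed: Replaces the per-cell current/streak/score state machine (scoreConsecutive) and its trailing-run flush by materialising each column, run-length-grouping it, and summing value*blockScore over the non-zero runs.
import Mathlib
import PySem

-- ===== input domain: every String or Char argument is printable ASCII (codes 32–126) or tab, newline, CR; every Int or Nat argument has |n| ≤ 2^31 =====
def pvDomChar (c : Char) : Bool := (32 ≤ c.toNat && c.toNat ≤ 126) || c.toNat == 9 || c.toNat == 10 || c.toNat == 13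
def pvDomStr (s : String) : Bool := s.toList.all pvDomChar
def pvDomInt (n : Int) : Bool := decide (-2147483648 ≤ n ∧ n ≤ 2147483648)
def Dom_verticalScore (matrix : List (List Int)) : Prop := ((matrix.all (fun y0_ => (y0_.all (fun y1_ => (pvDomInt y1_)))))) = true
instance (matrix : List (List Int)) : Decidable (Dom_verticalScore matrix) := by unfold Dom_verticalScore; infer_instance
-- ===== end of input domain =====

-- B replaces A's per-cell current/streak state machine by run-length grouping of each
-- column and summing value*blockScore over non-zero runs (objective: simpler).
-- ===== PORT A =====
def adjacentBlockScore (count : Int) : Int :=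
  -- scoreMatrix[count] with try/except returning -1 on IndexError (pyGet? = none)
  (PySem.List.pyGet? ([0, 2, 4, 8, 16, 32] : List Int) count).getD (-1)

def scoreConsecutive (block current streak score : Int) : Int × Int × Int :=
  if block ≠ current then
    if current = 0 then (block, 1, score)
    else (block, 1, score + current * adjacentBlockScore streak)
  else
    if block ≠ 0 then (current, streak + 1, score)
    else (current, streak, score)

def verticalScore (matrix : List (List Int)) : Int :=
  -1 *
    (PySem.List.pyRange 0 (matrix.length : Int) 1).foldl (fun score i =>
      let st :=
        (PySem.List.pyRange 0 (matrix.length : Int) 1).foldl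
          (fun (st : Int × Int × Int) j =>
            scoreConsecutive (PySem.List.pyGetD (PySem.List.pyGetD matrix j []) i 0)
              st.1 st.2.1 st.2.2)
          (0, 0, score)
      if st.1 ≠ 0 then st.2.2 + st.1 * adjacentBlockScore st.2.1 else st.2.2) 0

-- ===== PORT B =====
def blockScoreAlt (count : Int) : Int :=
  if count < 6 then PySem.List.pyGetD ([0, 2, 4, 8, 16, 32] : List Int) count 0 else -1

-- _runs: the inner while counts the leading repeats of the head (takeWhile), then
-- recurses on the remaining suffix xs[i:] (dropWhile)
def runsAlt : List Int → List (Int × Int)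
  | [] => []
  | x :: xs =>
      (x, 1 + ((xs.takeWhile (· == x)).length : Int)) :: runsAlt (xs.dropWhile (· == x))
termination_by xs => xs.length
decreasing_by
  simpa using Nat.lt_succ_of_le (List.length_dropWhile_le _ _)

def verticalScore_alt (matrix : List (List Int)) : Int :=
  -((PySem.List.pyRange 0 (matrix.length : Int) 1).foldl (fun total i =>
      let column := (PySem.List.pyRange 0 (matrix.length : Int) 1).map
        (fun j => PySem.List.pyGetD (PySem.List.pyGetD matrix j []) i 0)
      (runsAlt column).foldl
        (fun t (vl : Int × Int) => if vl.1 ≠ 0 then t + vl.1 * blockScoreAlt vl.2 else t)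
        total) 0)

-- ===== PRECONDITION & SPEC =====
-- Pre_ excludes exactly the ragged matrices on which Python A raises IndexError
-- (some row shorter than the number of rows).
def Pre_verticalScore (matrix : List (List Int)) : Prop :=
  ∀ row ∈ matrix, matrix.length ≤ row.length
instance (matrix : List (List Int)) : Decidable (Pre_verticalScore matrix) := by
  unfold Pre_verticalScore; infer_instance
def pvWitness_verticalScore : List (List Int) := [[1, 0], [1, -1]]
def Spec_verticalScore (matrix : List (List Int)) (out : Int) : Prop := out = verticalScore_alt matrix
instance (matrix : List (List Int)) (out : Int) : Decidable (Spec_verticalScore matrix out) := by unfold Spec_verticalScore; infer_instance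

-- ===== CLAIM (what is proved, stated in full; the proofs are below) =====
def Claim_equal_verticalScore : Prop := ∀ (matrix : List (List Int)), Dom_verticalScore matrix → Pre_verticalScore matrix → Spec_verticalScore matrix (verticalScore matrix)

-- ===== LEMMAS AND PROOFS =====

-- both block-score tables agree on the run lengths that actually occur (k ≥ 1)
theorem blockScore_agree (k : Int) (hk : 1 ≤ k) : adjacentBlockScore k = blockScoreAlt k := by
  by_cases h6 : k < 6
  · interval_cases k <;> decide
  · unfold adjacentBlockScore blockScoreAlt
    rw [if_neg h6]
    rw [(PySem.List.pyGet?_eq_none_iff _ _).2 (by simp [PySem.Raise.InRange]; omega)]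
    rfl

-- abbreviations used only by the proofs
def gAlt : Int → Int × Int → Int :=
  fun t vl => if vl.1 ≠ 0 then t + vl.1 * blockScoreAlt vl.2 else t

def colScore (xs : List Int) : Int := (runsAlt xs).foldl gAlt 0

theorem foldl_gAlt_shift (l : List (Int × Int)) : ∀ t : Int, l.foldl gAlt t = t + l.foldl gAlt 0 := by
  induction l with
  | nil => intro t; simp
  | cons v l ih =>
      intro t
      simp only [List.foldl_cons]
      rw [ih (gAlt t v), ih (gAlt 0 v)]
      unfold gAlt; split_ifs <;> ring

theorem colScore_cons (x : Int) (ys : List Int) :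
    colScore (x :: ys) =
      (if x ≠ 0 then x * blockScoreAlt (1 + ((ys.takeWhile (· == x)).length : Int)) else 0)
        + colScore (ys.dropWhile (· == x)) := by
  unfold colScore
  rw [runsAlt, List.foldl_cons, foldl_gAlt_shift]
  unfold gAlt; split_ifs <;> ring

-- skipping a leading block of zeros does not change the run score
theorem colScore_dropZeros (ys : List Int) : colScore (ys.dropWhile (· == (0:Int))) = colScore ys := by
  cases ys with
  | nil => rfl
  | cons y zs =>
      by_cases hy : y = 0
      · subst hy
        rw [List.dropWhile_cons_of_pos (by simp), colScore_cons]
        simp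
      · rw [List.dropWhile_cons_of_neg (by simp [hy])]

def stepA : Int × Int × Int → Int → Int × Int × Int :=
  fun st x => scoreConsecutive x st.1 st.2.1 st.2.2

def flushA (st : Int × Int × Int) : Int :=
  if st.1 ≠ 0 then st.2.2 + st.1 * adjacentBlockScore st.2.1 else st.2.2

-- the heart of the equivalence: the state machine over a column computes the run scores
theorem stateMachine_runs (xs : List Int) :
    (∀ k s : Int, flushA (xs.foldl stepA (0, k, s)) = s + colScore xs) ∧
    (∀ c k s : Int, c ≠ 0 → 1 ≤ k →
      flushA (xs.foldl stepA (c, k, s)) =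
        s + c * adjacentBlockScore (k + ((xs.takeWhile (· == c)).length : Int))
          + colScore (xs.dropWhile (· == c))) := by
  induction xs with
  | nil =>
      constructor
      · intro k s; simp [flushA, colScore, runsAlt]
      · intro c k s hc _
        simp [flushA, hc, colScore, runsAlt]
  | cons x ys ih =>
      constructor
      · intro k s
        by_cases hx : x = 0
        · subst hx
          have h1 : stepA (0, k, s) 0 = (0, k, s) := by simp [stepA, scoreConsecutive]
          rw [List.foldl_cons, h1, ih.1 k s, ← colScore_dropZeros (0 :: ys),
            List.dropWhile_cons_of_pos (by simp), colScore_dropZeros]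
        · have h1 : stepA (0, k, s) x = (x, 1, s) := by simp [stepA, scoreConsecutive, hx]
          rw [List.foldl_cons, h1, ih.2 x 1 s hx (by omega), colScore_cons]
          rw [if_pos hx, blockScore_agree _ (by omega)]
          ring
      · intro c k s hc hk
        by_cases hxc : x = c
        · subst hxc
          have h1 : stepA (x, k, s) x = (x, k + 1, s) := by simp [stepA, scoreConsecutive, hc]
          rw [List.foldl_cons, h1, ih.2 x (k + 1) s hc (by omega),
            List.takeWhile_cons_of_pos (by simp), List.dropWhile_cons_of_pos (by simp)]
          simp only [List.length_cons]
          push_cast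
          ring_nf
        · have h1 : stepA (c, k, s) x = (x, 1, s + c * adjacentBlockScore k) := by
            simp [stepA, scoreConsecutive, hxc, hc]
          rw [List.foldl_cons, h1, List.takeWhile_cons_of_neg (by simp [hxc]),
            List.dropWhile_cons_of_neg (by simp [hxc])]
          by_cases hx : x = 0
          · subst hx
            rw [ih.1 1 (s + c * adjacentBlockScore k), ← colScore_dropZeros (0 :: ys),
              List.dropWhile_cons_of_pos (by simp), colScore_dropZeros]
            simp only [List.length_nil, Nat.cast_zero, add_zero]
          · have hB : adjacentBlockScore (1 + ((ys.takeWhile (· == x)).length : Int))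
                = blockScoreAlt (1 + ((ys.takeWhile (· == x)).length : Int)) :=
              blockScore_agree _ (by omega)
            rw [ih.2 x 1 (s + c * adjacentBlockScore k) hx (by omega), colScore_cons,
              if_pos hx, hB]
            simp only [List.length_nil, Nat.cast_zero, add_zero]
            ring

-- per-column equality, on the column as a list
theorem column_eq (col : List Int) (s : Int) :
    flushA (col.foldl stepA (0, 0, s)) = (runsAlt col).foldl gAlt s := by
  rw [(stateMachine_runs col).1 0 s, foldl_gAlt_shift]
  rfl

theorem verticalScore_eq (matrix : List (List Int)) :
    verticalScore matrix = verticalScore_alt matrix := by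
  unfold verticalScore verticalScore_alt
  rw [neg_one_mul]
  congr 1
  apply List.foldl_ext
  intro score i _
  show flushA ((PySem.List.pyRange 0 (matrix.length : Int) 1).foldl
      (fun st j => stepA st (PySem.List.pyGetD (PySem.List.pyGetD matrix j []) i 0)) (0, 0, score))
    = (runsAlt ((PySem.List.pyRange 0 (matrix.length : Int) 1).map
        (fun j => PySem.List.pyGetD (PySem.List.pyGetD matrix j []) i 0))).foldl gAlt score
  have hmap : (PySem.List.pyRange 0 (matrix.length : Int) 1).map
      (fun j => PySem.List.pyGetD (PySem.List.pyGetD matrix j []) i 0)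
      = matrix.map (fun row => PySem.List.pyGetD row i 0) := by
    conv_rhs => rw [← PySem.List.map_pyGetD_pyRange_zero' matrix []]
    rw [List.map_map]
    rfl
  rw [hmap, PySem.List.foldl_pyRange_zero_pyGetD' matrix []
      (fun st row => stepA st (PySem.List.pyGetD row i 0)) ((0 : Int), (0 : Int), score),
    ← List.foldl_map (f := fun row => PySem.List.pyGetD row i 0) (g := stepA)]
  exact column_eq _ score

-- ===== VERDICT (by name: the statement is the Claim_ definition above) =====
theorem verticalScore_spec : Claim_equal_verticalScore := by
  intro matrix _ _
  unfold Spec_verticalScore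
  exact verticalScore_eq matrix
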